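-- pv_equiv track=rewrite | github.com/coryoconnor/ardisi | Dice.py | summarize_die
-- ===== SOURCE A (Python) =====
-- class df: MISS = 'miss'; HIT = 'hit'; ACC = 'accuracy'; CRIT = 'crit'; HITHIT = 'hithit'; CRITHIT = 'crithit';
--
-- def summarize_die(result, crits_are_hits=True, crits_matter=True):
--     hits = 0
--     accuracies = 0
--     critical = False
--     for _, rolls in result.items():
--         for roll in rolls:
--             if roll == df.MISS:
--                 continue
--             if roll == df.HIT:
--                 hits += 1
--                 continue
--             if roll == df.ACC:
--                 accuracies += 1
--                 continue
--             if roll == df.CRIT: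
--                 if crits_are_hits:
--                     hits += 1
--                 if crits_matter:
--                     critical = True
--                 continue
--             if roll == df.HITHIT:
--                 hits += 2
--                 continue
--             if roll == df.CRITHIT:
--                 hits += 1
--                 if crits_are_hits:
--                     hits += 1
--                 if crits_matter:
--                     critical = True
--                 continue
--             raise Exception('ERROR: strange dice face: ' + roll)
--     txtresult = ''
--     if hits > 0:
--         txtresult += str(hits)
--     else:
--         return '0'
--     if critical:
--         txtresult += 'C'
--     if accuracies > 0:
--         txtresult += accuracies * 'A'
--     return txtresult
-- ===== SOURCE B (Python) =====
-- def summarize_die(result, crits_are_hits=True, crits_matter=True):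
--     faces = [roll for rolls in result.values() for roll in rolls]
--     for roll in faces:
--         if roll not in ('miss', 'hit', 'accuracy', 'crit', 'hithit', 'crithit'):
--             raise Exception('ERROR: strange dice face: ' + roll)
--     crits = faces.count('crit') + faces.count('crithit')
--     hits = (faces.count('hit') + 2 * faces.count('hithit') + faces.count('crithit')
--             + (crits if crits_are_hits else 0))
--     accuracies = faces.count('accuracy')
--     if hits == 0:
--         return '0'
--     return str(hits) + ('C' if crits_matter and crits > 0 else '') + accuracies * 'A'
-- ===== Notes on version B (the rewrite author's own statement) =====
-- stated objective: simpler
-- what changed: Replaces A's branch-by-branch accumulator loop over the nested rolls by flattening all rolls once and computing hits, accuracies and the critical flag in closed form from face counts (list.count), keeping a single up-front validation pass for the exact exception.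
import Mathlib
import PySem

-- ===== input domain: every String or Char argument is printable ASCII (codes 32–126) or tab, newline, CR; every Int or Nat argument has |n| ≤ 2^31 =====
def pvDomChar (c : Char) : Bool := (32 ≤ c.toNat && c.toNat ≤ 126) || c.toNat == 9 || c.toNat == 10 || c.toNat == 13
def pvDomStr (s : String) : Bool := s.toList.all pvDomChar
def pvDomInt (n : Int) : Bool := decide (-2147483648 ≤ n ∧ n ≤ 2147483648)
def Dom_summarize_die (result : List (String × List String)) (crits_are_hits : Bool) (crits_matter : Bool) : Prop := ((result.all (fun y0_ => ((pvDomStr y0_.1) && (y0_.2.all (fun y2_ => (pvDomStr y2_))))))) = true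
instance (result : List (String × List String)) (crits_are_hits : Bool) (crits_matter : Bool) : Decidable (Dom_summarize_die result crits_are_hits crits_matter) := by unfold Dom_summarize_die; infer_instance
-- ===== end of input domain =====

-- ===== PORT A =====
-- B replaces A's branch-by-branch accumulator loop over the nested rolls by flattening the
-- rolls and computing hits/accuracies/critical in closed form from face counts (objective: simpler).
-- step of A's inner loop; the final branch is where Python raises (excluded by Pre_)
def pvStepA (cah cm : Bool) (s : Int × Int × Bool) (roll : String) : Int × Int × Bool :=
  if roll = "miss" then s
  else if roll = "hit" then (s.1 + 1, s.2.1, s.2.2)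
  else if roll = "accuracy" then (s.1, s.2.1 + 1, s.2.2)
  else if roll = "crit" then
    ((if cah then s.1 + 1 else s.1), s.2.1, (if cm then true else s.2.2))
  else if roll = "hithit" then (s.1 + 2, s.2.1, s.2.2)
  else if roll = "crithit" then
    (let h := s.1 + 1
     ((if cah then h + 1 else h), s.2.1, (if cm then true else s.2.2)))
  else s  -- Python: raise Exception('ERROR: strange dice face: ' + roll); outside Pre_

def summarize_die (result : List (String × List String)) (crits_are_hits : Bool) (crits_matter : Bool) : String :=
  let st := result.foldl (fun s p => p.2.foldl (pvStepA crits_are_hits crits_matter) s) (0, 0, false)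
  if st.1 > 0 then
    PySem.Int.toStr st.1 ++ (if st.2.2 then "C" else "")
      ++ (if st.2.1 > 0 then String.mk (List.replicate st.2.1.toNat 'A') else "")
  else "0"

-- ===== PORT B =====
def summarize_die_alt (result : List (String × List String)) (crits_are_hits : Bool) (crits_matter : Bool) : String :=
  let faces := result.flatMap (fun p => p.2)
  -- Source B's validation pass raises on a strange face; those inputs are outside Pre_
  let crits : Int := (PySem.List.count faces "crit" : Int) + (PySem.List.count faces "crithit" : Int)
  let hits : Int := (PySem.List.count faces "hit" : Int) + 2 * (PySem.List.count faces "hithit" : Int)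
      + (PySem.List.count faces "crithit" : Int) + (if crits_are_hits then crits else 0)
  let accuracies : Int := (PySem.List.count faces "accuracy" : Int)
  if hits = 0 then "0"
  else PySem.Int.toStr hits ++ (if crits_matter && decide (crits > 0) then "C" else "")
      ++ String.mk (List.replicate accuracies.toNat 'A')

-- ===== PRECONDITION & SPEC =====
-- Pre_ excludes exactly the inputs on which A raises: some roll is not one of the six known faces.
def Pre_summarize_die (result : List (String × List String)) (crits_are_hits : Bool) (crits_matter : Bool) : Prop :=
  (result.all (fun p => p.2.all (fun r =>
    r == "miss" || r == "hit" || r == "accuracy" || r == "crit" || r == "hithit" || r == "crithit"))) = true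

instance (result : List (String × List String)) (crits_are_hits : Bool) (crits_matter : Bool) : Decidable (Pre_summarize_die result crits_are_hits crits_matter) := by unfold Pre_summarize_die; infer_instance

def pvWitness_summarize_die : (List (String × List String)) × Bool × Bool :=
  ([("red", ["hit", "crit", "miss"]), ("blue", ["accuracy", "crithit"])], true, true)

def Spec_summarize_die (result : List (String × List String)) (crits_are_hits : Bool) (crits_matter : Bool) (out : String) : Prop := out = summarize_die_alt result crits_are_hits crits_matter
instance (result : List (String × List String)) (crits_are_hits : Bool) (crits_matter : Bool) (out : String) : Decidable (Spec_summarize_die result crits_are_hits crits_matter out) := by unfold Spec_summarize_die; infer_instance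

-- ===== CLAIM (what is proved, stated in full; the proofs are below) =====
def Claim_equal_summarize_die : Prop := ∀ (result : List (String × List String)) (crits_are_hits : Bool) (crits_matter : Bool), Dom_summarize_die result crits_are_hits crits_matter → Pre_summarize_die result crits_are_hits crits_matter → Spec_summarize_die result crits_are_hits crits_matter (summarize_die result crits_are_hits crits_matter)

-- ===== LEMMAS AND PROOFS =====

def pvValid (r : String) : Bool :=
  r == "miss" || r == "hit" || r == "accuracy" || r == "crit" || r == "hithit" || r == "crithit"

-- A's nested loops are one loop over the flattened faces
theorem pv_foldl_flat (cah cm : Bool) (l : List (String × List String)) (s : Int × Int × Bool) :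
    l.foldl (fun s p => p.2.foldl (pvStepA cah cm) s) s
      = (l.flatMap (fun p => p.2)).foldl (pvStepA cah cm) s := by
  induction l generalizing s with
  | nil => rfl
  | cons p t ih => simp [List.flatMap_cons, List.foldl_append, ih]

-- the loop invariant: A's fold over valid faces, in closed form from the counts
theorem pv_invariant (cah cm : Bool) (faces : List String) (hv : ∀ r ∈ faces, pvValid r = true)
    (h a : Int) (c : Bool) :
    faces.foldl (pvStepA cah cm) (h, a, c)
      = (h + (faces.count "hit" : Int) + 2 * (faces.count "hithit" : Int)
            + (faces.count "crithit" : Int)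
            + (if cah then (faces.count "crit" : Int) + (faces.count "crithit" : Int) else 0),
         a + (faces.count "accuracy" : Int),
         c || (cm && decide ((faces.count "crit" : Int) + (faces.count "crithit" : Int) > 0))) := by
  induction faces generalizing h a c with
  | nil => simp
  | cons r t ih =>
    have hr := hv r (List.mem_cons_self ..)
    have ht : ∀ x ∈ t, pvValid x = true := fun x hx => hv x (List.mem_cons_of_mem _ hx)
    simp only [pvValid, Bool.or_eq_true, beq_iff_eq] at hr
    rcases hr with ((((hr | hr) | hr) | hr) | hr) | hr <;> subst hr <;>
      simp only [List.foldl_cons, pvStepA, reduceIte, ih ht] <;>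
      cases cah <;> cases cm <;> cases c <;>
      simp [Prod.ext_iff] <;> omega

-- ===== VERDICT (by name: the statement is the Claim_ definition above) =====
theorem summarize_die_spec : Claim_equal_summarize_die := by
  intro result cah cm _ hpre
  unfold Spec_summarize_die summarize_die summarize_die_alt
  have hv : ∀ r ∈ result.flatMap (fun p => p.2), pvValid r = true := by
    intro r hr
    rw [List.mem_flatMap] at hr
    obtain ⟨p, hp, hrp⟩ := hr
    unfold Pre_summarize_die at hpre
    rw [List.all_eq_true] at hpre
    have := hpre p hp
    rw [List.all_eq_true] at this
    exact this r hrp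
  set faces := result.flatMap (fun p => p.2) with hf
  rw [pv_foldl_flat, ← hf, pv_invariant cah cm faces hv 0 0 false]
  simp only [PySem.List.count_eq, zero_add, Bool.false_or]
  set hits : Int := (faces.count "hit" : Int) + 2 * (faces.count "hithit" : Int)
      + (faces.count "crithit" : Int)
      + (if cah then (faces.count "crit" : Int) + (faces.count "crithit" : Int) else 0) with hh
  have hnn : 0 ≤ hits := by
    have h1 : (0:Int) ≤ (faces.count "hit" : Int) := Int.natCast_nonneg _
    have h2 : (0:Int) ≤ (faces.count "hithit" : Int) := Int.natCast_nonneg _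
    have h3 : (0:Int) ≤ (faces.count "crithit" : Int) := Int.natCast_nonneg _
    have h4 : (0:Int) ≤ (faces.count "crit" : Int) := Int.natCast_nonneg _
    rw [hh]; split <;> omega
  by_cases h0 : hits = 0
  · simp [h0]
  · have hpos : hits > 0 := lt_of_le_of_ne hnn (Ne.symm h0)
    simp only [if_pos hpos, if_neg h0]
    congr 1
    by_cases ha : (faces.count "accuracy" : Int) > 0
    · rw [if_pos ha]
    · have hz : faces.count "accuracy" = 0 := by omega
      rw [if_neg ha, hz]
      rfl
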